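-- pv_equiv track=rewrite | github.com/iiputilo/YNDX-ALGORITHM-TRAINING | 1/HW2/B.py | seq_type
-- ===== SOURCE A (Python) =====
-- def seq_type(seq):
--     repeats = 0
--     ascending_check = 0
--     descending_check = 0
--     num_prev = seq[0]
--     for num in range(1, len(seq)):
--         if seq[num] < num_prev:
--             descending_check += 1
--             num_prev = seq[num]
--         elif seq[num] > num_prev:
--             ascending_check += 1
--             num_prev = seq[num]
--         elif seq[num] == num_prev:
--             repeats += 1
--     if repeats == len(seq) - 1:
--         return 'CONSTANT'
--     elif descending_check == len(seq) - 1: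
--         return 'DESCENDING'
--     elif ascending_check == len(seq) - 1:
--         return 'ASCENDING'
--     elif ascending_check and descending_check > 0:
--         return 'RANDOM'
--     elif (ascending_check and repeats > 0) and descending_check == 0:
--         return 'WEAKLY ASCENDING'
--     else:
--         return 'WEAKLY DESCENDING'
-- ===== SOURCE B (Python) =====
-- def seq_type(seq):
--     pairs = list(zip(seq, seq[1:]))
--     has_inc = any(a < b for a, b in pairs)
--     has_dec = any(a > b for a, b in pairs)
--     has_eq = any(a == b for a, b in pairs)
--     if not has_inc and not has_dec:
--         return 'CONSTANT'
--     if has_inc and has_dec: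
--         return 'RANDOM'
--     if has_inc:
--         return 'WEAKLY ASCENDING' if has_eq else 'ASCENDING'
--     return 'WEAKLY DESCENDING' if has_eq else 'DESCENDING'
-- ===== Notes on version B (the rewrite author's own statement) =====
-- stated objective: simpler
-- what changed: Replaces A's counting pass with updated previous-element state and counter-vs-length comparisons by three existence flags over adjacent pairs (zip) and a direct six-way classification from the flags.
import Mathlib
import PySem

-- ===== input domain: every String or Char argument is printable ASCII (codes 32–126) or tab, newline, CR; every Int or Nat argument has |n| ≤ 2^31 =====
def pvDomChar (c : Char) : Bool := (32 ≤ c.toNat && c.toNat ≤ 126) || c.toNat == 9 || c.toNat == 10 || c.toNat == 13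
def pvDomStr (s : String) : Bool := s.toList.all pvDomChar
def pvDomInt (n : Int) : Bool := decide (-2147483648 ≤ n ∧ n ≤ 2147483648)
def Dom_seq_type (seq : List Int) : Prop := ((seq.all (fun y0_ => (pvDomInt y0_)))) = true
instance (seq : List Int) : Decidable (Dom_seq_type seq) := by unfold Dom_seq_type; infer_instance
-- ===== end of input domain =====

-- B replaces A's counting pass (three counters plus a tracked previous element, compared
-- against len-1) by three existence flags over adjacent pairs and a direct classification:
-- objective 'simpler', same O(n) cost.

-- ===== PORT A =====
-- state = (repeats, ascending_check, descending_check, num_prev)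
def seqTypeStep (s : Int × Int × Int × Int) (x : Int) : Int × Int × Int × Int :=
  match s with
  | (rep, asc, dec, prev) =>
    if x < prev then (rep, asc, dec + 1, x)
    else if x > prev then (rep, asc + 1, dec, x)
    else if x = prev then (rep + 1, asc, dec, prev)
    else (rep, asc, dec, prev)

def seq_type (seq : List Int) : String :=
  let n : Int := seq.length
  let st := (PySem.List.pyRange 1 n 1).foldl
    (fun s num => seqTypeStep s (PySem.List.pyGetD seq num 0))
    (0, 0, 0, PySem.List.pyGetD seq 0 0)
  match st with
  | (repeats, asc, dec, _) =>
    if repeats = n - 1 then "CONSTANT"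
    else if dec = n - 1 then "DESCENDING"
    else if asc = n - 1 then "ASCENDING"
    else if asc ≠ 0 ∧ dec > 0 then "RANDOM"
    else if (asc ≠ 0 ∧ repeats > 0) ∧ dec = 0 then "WEAKLY ASCENDING"
    else "WEAKLY DESCENDING"

-- ===== PORT B =====
-- the three adjacent-pair tests of Source B's generator expressions
def pairLt (q : Int × Int) : Bool := decide (q.1 < q.2)
def pairGt (q : Int × Int) : Bool := decide (q.1 > q.2)
def pairEq (q : Int × Int) : Bool := decide (q.1 = q.2)

def seq_type_alt (seq : List Int) : String :=
  let pairs := seq.zip (PySem.List.slice seq (some 1) none)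
  let hasInc := pairs.any pairLt
  let hasDec := pairs.any pairGt
  let hasEq := pairs.any pairEq
  if !hasInc && !hasDec then "CONSTANT"
  else if hasInc && hasDec then "RANDOM"
  else if hasInc then (if hasEq then "WEAKLY ASCENDING" else "ASCENDING")
  else (if hasEq then "WEAKLY DESCENDING" else "DESCENDING")

-- ===== PRECONDITION & SPEC =====
-- Pre_ excludes only the empty list, on which A raises IndexError (seq[0]).
def Pre_seq_type (seq : List Int) : Prop := seq ≠ []
instance (seq : List Int) : Decidable (Pre_seq_type seq) := by unfold Pre_seq_type; infer_instance
def pvWitness_seq_type : List Int := ([1, 2, 2] : List Int)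

def Spec_seq_type (seq : List Int) (out : String) : Prop := out = seq_type_alt seq
instance (seq : List Int) (out : String) : Decidable (Spec_seq_type seq out) := by unfold Spec_seq_type; infer_instance

-- ===== CLAIM (what is proved, stated in full; the proofs are below) =====
def Claim_equal_seq_type : Prop := ∀ (seq : List Int), Dom_seq_type seq → Pre_seq_type seq → Spec_seq_type seq (seq_type seq)

-- ===== LEMMAS AND PROOFS =====

-- count of adjacent pairs (prev, x) of (prev :: l) satisfying p
def cnt (p : Int × Int → Bool) : Int → List Int → Int
  | _, [] => 0
  | prev, x :: xs => (if p (prev, x) then 1 else 0) + cnt p x xs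

theorem cnt_nonneg (p : Int × Int → Bool)
    (prev : Int) (l : List Int) : 0 ≤ cnt p prev l := by
  induction l generalizing prev with
  | nil => simp [cnt]
  | cons x xs ih => simp only [cnt]; have := ih x; split <;> omega

theorem cnt_sum (prev : Int) (l : List Int) :
    cnt pairEq prev l + cnt pairLt prev l
      + cnt pairGt prev l = l.length := by
  induction l generalizing prev with
  | nil => simp [cnt]
  | cons x xs ih =>
    simp only [cnt, List.length_cons, pairEq, pairLt, pairGt]
    have := ih x
    rcases lt_trichotomy prev x with h | h | h <;>
      simp only [decide_eq_true_eq] <;> split_ifs <;> push_cast <;> omega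

-- A's loop computes the three pair-counts and ends with prev = last element
theorem flag_false {b : Bool} {c : Int} (h : b = true ↔ 0 < c) (hc : ¬ 0 < c) : b = false := by
  cases b
  · rfl
  · exact absurd (h.mp rfl) hc

theorem foldA (l : List Int) : ∀ (prev rep asc dec : Int),
    l.foldl seqTypeStep (rep, asc, dec, prev) =
      (rep + cnt pairEq prev l, asc + cnt pairLt prev l,
       dec + cnt pairGt prev l, (prev :: l).getLast (by simp)) := by
  induction l with
  | nil => simp [cnt]
  | cons x xs ih =>
    intro prev rep asc dec
    simp only [List.foldl_cons, seqTypeStep, cnt]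
    rcases lt_trichotomy x prev with h | h | h
    · rw [if_pos h, ih]
      have e1 : ¬ prev = x := by omega
      have e2 : ¬ prev < x := by omega
      refine Prod.ext ?_ (Prod.ext ?_ (Prod.ext ?_ ?_)) <;>
        · simp [pairEq, pairLt, pairGt, e1, e2, h, List.getLast_cons]
          try omega
    · subst h
      rw [if_neg (by omega), if_neg (by omega), if_pos rfl, ih]
      refine Prod.ext ?_ (Prod.ext ?_ (Prod.ext ?_ ?_)) <;>
        · simp [pairEq, pairLt, pairGt, List.getLast_cons]
          try omega
    · rw [if_neg (by omega), if_pos h, ih]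
      have e1 : ¬ prev = x := by omega
      have e2 : ¬ prev > x := by omega
      refine Prod.ext ?_ (Prod.ext ?_ (Prod.ext ?_ ?_)) <;>
        · simp [pairEq, pairLt, pairGt, e1, e2, h, List.getLast_cons]
          try omega

-- B's flags as positivity of A's counts
theorem anyFlag (p : Int × Int → Bool)
    (prev : Int) (l : List Int) :
    (((prev :: l).zip l).any p = true) ↔ 0 < cnt p prev l := by
  induction l generalizing prev with
  | nil => simp [cnt]
  | cons x xs ih =>
    simp only [List.zip_cons_cons, List.any_cons, cnt, Bool.or_eq_true]
    have := cnt_nonneg p x xs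
    constructor
    · rintro (h | h)
      · rw [if_pos h]; omega
      · have := (ih x).mp h; split <;> omega
    · intro h
      by_cases hp : p (prev, x) = true
      · exact Or.inl hp
      · rw [if_neg hp] at h; exact Or.inr ((ih x).mpr (by omega))

theorem seq_type_eq_alt (seq : List Int) (h : seq ≠ []) : seq_type seq = seq_type_alt seq := by
  obtain ⟨p, l, rfl⟩ : ∃ p l, seq = p :: l := by
    cases seq with | nil => exact absurd rfl h | cons a b => exact ⟨a, b, rfl⟩
  simp only [seq_type, seq_type_alt]
  rw [PySem.List.foldl_pyRange_pyGetD' (xs := p :: l) (a := 1) (d := 0)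
      (f := seqTypeStep) (init := (0, 0, 0, PySem.List.pyGetD (p :: l) 0 0)) (by omega)]
  simp only [Int.toNat_one, List.drop_succ_cons, List.drop_zero, PySem.List.pyGetD_zero_cons]
  rw [foldA, PySem.List.slice_from_one]
  simp only [List.tail_cons]
  have hsum := cnt_sum p l
  have h1 := cnt_nonneg pairEq p l
  have h2 := cnt_nonneg pairLt p l
  have h3 := cnt_nonneg pairGt p l
  have hE := anyFlag pairEq p l
  have hI := anyFlag pairLt p l
  have hD := anyFlag pairGt p l
  have hlen : ((p :: l).length : Int) - 1 = (l.length : Int) := by simp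
  rw [hlen]
  set cE := cnt pairEq p l with hcE
  set cI := cnt pairLt p l with hcI
  set cD := cnt pairGt p l with hcD
  set bE := ((p :: l).zip l).any pairEq with hbE
  set bI := ((p :: l).zip l).any pairLt with hbI
  set bD := ((p :: l).zip l).any pairGt with hbD
  simp only [zero_add, ← hbE]
  by_cases hconst : cE = (l.length : Int)
  · rw [if_pos hconst]
    simp only [flag_false hI (by omega), flag_false hD (by omega)]
    rfl
  · rw [if_neg hconst]
    have hne : 0 < cI ∨ 0 < cD := by omega
    have hc : (!bI && !bD) = false := by
      rcases hne with hb | hb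
      · simp [hI.mpr hb]
      · simp [hD.mpr hb]
    simp only [hc, Bool.false_eq_true, if_false]
    by_cases hdesc : cD = (l.length : Int)
    · rw [if_pos hdesc]
      simp only [flag_false hI (by omega), flag_false hE (by omega)]
      rfl
    · rw [if_neg hdesc]
      by_cases hasc : cI = (l.length : Int)
      · rw [if_pos hasc]
        simp only [hI.mpr (by omega), flag_false hD (by omega), flag_false hE (by omega)]
        rfl
      · rw [if_neg hasc]
        by_cases hrand : cI ≠ 0 ∧ cD > 0
        · rw [if_pos hrand]
          simp only [hI.mpr (by omega), hD.mpr (by omega)]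
          rfl
        · rw [if_neg hrand]
          by_cases hwa : (cI ≠ 0 ∧ cE > 0) ∧ cD = 0
          · rw [if_pos hwa]
            simp only [hI.mpr (by omega), flag_false hD (by omega), hE.mpr (by omega)]
            rfl
          · rw [if_neg hwa]
            -- remaining: cI = 0, cD > 0, cE > 0
            have hci : cI = 0 := by
              by_contra hci
              have hcd : cD = 0 := by omega
              have hce : cE = 0 := by
                by_contra hce; exact hwa ⟨⟨hci, by omega⟩, hcd⟩
              omega
            simp only [flag_false hI (by omega), hD.mpr (by omega), hE.mpr (by omega)]
            rfl

-- ===== VERDICT (by name: the statement is the Claim_ definition above) =====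
theorem seq_type_spec : Claim_equal_seq_type := by
  intro seq _ hpre
  unfold Spec_seq_type
  exact seq_type_eq_alt seq hpre
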